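-- pv_equiv track=rewrite | github.com/SeungAhSon/Baekjoon | 프로그래머스/0/120956. 옹알이 （1）/옹알이 （1）.py | solution
-- ===== SOURCE A (Python) =====
-- def solution(babbling):
--     bab = ["aya", "ye", "woo", "ma"]
--     answer = 0
--     for i in babbling:
--         while len(i)>1:
--             if i[:2] == "ye" or i[:2] == "ma": i = i[2:]
--             elif i[:3] == "aya" or i[:3] == "woo": i = i[3:]
--             else : break
--         if len(i)==0: answer+=1
--
--     return answer
-- ===== SOURCE B (Python) =====
-- import re
--
-- _BABBLE = re.compile(r'(aya|ye|woo|ma)*')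
--
-- def solution(babbling):
--     return sum(1 for w in babbling if _BABBLE.fullmatch(w))
-- ===== Notes on version B (the rewrite author's own statement) =====
-- stated objective: idiomatic
-- what changed: Replaced the manual while-loop that greedily strips allowed prefixes with a single regex fullmatch of (aya|ye|woo|ma)* per word, summed over the list; equivalence holds because the four pieces start with distinct letters so greedy stripping equals language membership.
import Mathlib
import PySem

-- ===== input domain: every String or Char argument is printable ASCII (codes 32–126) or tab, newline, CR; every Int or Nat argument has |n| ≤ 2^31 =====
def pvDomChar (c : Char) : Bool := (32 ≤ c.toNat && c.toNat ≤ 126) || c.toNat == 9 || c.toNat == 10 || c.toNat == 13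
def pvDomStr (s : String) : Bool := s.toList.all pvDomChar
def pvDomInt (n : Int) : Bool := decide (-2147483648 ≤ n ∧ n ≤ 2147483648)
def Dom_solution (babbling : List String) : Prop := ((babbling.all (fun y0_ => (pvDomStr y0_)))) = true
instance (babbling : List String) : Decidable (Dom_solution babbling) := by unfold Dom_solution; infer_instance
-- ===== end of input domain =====

-- B replaces A's manual greedy prefix-stripping loop with an idiomatic whole-word
-- membership test for the language (aya|ye|woo|ma)* (re.fullmatch in Python).


-- ===== PORT A =====
-- the while-loop: repeatedly strip "ye"/"ma" (2 chars) or "aya"/"woo" (3 chars)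
-- from the front while the string is longer than 1; i[:k] is List.take k, i[k:] is List.drop k
def stripA (i : List Char) : List Char :=
  if _h : i.length > 1 then
    if i.take 2 = ['y','e'] ∨ i.take 2 = ['m','a'] then stripA (i.drop 2)
    else if i.take 3 = ['a','y','a'] ∨ i.take 3 = ['w','o','o'] then stripA (i.drop 3)
    else i
  else i
termination_by i.length
decreasing_by
  · simp; omega
  · simp; omega

def solution (babbling : List String) : Int :=
  babbling.foldl (fun answer i => if (stripA i.toList).length = 0 then answer + 1 else answer) 0

-- ===== PORT B =====
-- hand-written port of re.fullmatch(r'(aya|ye|woo|ma)*', w): exact for this pattern,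
-- because the four alternatives begin with distinct letters the regex engine never
-- backtracks, so trying the alternatives in order on the remaining suffix is its behaviour
def babbleMatch (cs : List Char) : Bool :=
  if cs = [] then true
  else if cs.take 3 = ['a','y','a'] then babbleMatch (cs.drop 3)
  else if cs.take 2 = ['y','e'] then babbleMatch (cs.drop 2)
  else if cs.take 3 = ['w','o','o'] then babbleMatch (cs.drop 3)
  else if cs.take 2 = ['m','a'] then babbleMatch (cs.drop 2)
  else false
termination_by cs.length
decreasing_by
  all_goals simp_all
  all_goals
    first
    | (have : cs.length ≥ 3 := by
        have := congrArg List.length ‹cs.take 3 = _›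
        simp [List.length_take] at this; omega
       omega)
    | (have : cs.length ≥ 2 := by
        have := congrArg List.length ‹cs.take 2 = _›
        simp [List.length_take] at this; omega
       omega)

def solution_alt (babbling : List String) : Int :=
  (babbling.countP (fun w => babbleMatch w.toList) : Int)

-- ===== PRECONDITION & SPEC =====
def Spec_solution (babbling : List String) (out : Int) : Prop := out = solution_alt babbling
instance (babbling : List String) (out : Int) : Decidable (Spec_solution babbling out) := by unfold Spec_solution; infer_instance

-- ===== CLAIM (what is proved, stated in full; the proofs are below) =====
def Claim_equal_solution : Prop := ∀ (babbling : List String), Dom_solution babbling → Spec_solution babbling (solution babbling)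

-- ===== LEMMAS AND PROOFS =====

-- greedy stripping empties the word iff the word is in the language (aya|ye|woo|ma)*;
-- this holds because the four pieces begin with distinct letters
theorem strip_empty_iff (cs : List Char) : (stripA cs).length = 0 ↔ babbleMatch cs = true := by
  match cs with
  | [] => simp [stripA, babbleMatch]
  | [c] => rw [stripA, babbleMatch]; simp [List.take]
  | c1 :: c2 :: rest =>
    by_cases hye : c1 = 'y' ∧ c2 = 'e'
    · obtain ⟨rfl, rfl⟩ := hye
      rw [show stripA ('y'::'e'::rest) = stripA rest from by rw [stripA]; simp [List.take],
          show babbleMatch ('y'::'e'::rest) = babbleMatch rest from by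
            rw [babbleMatch]; simp [List.take]]
      exact strip_empty_iff rest
    · by_cases hma : c1 = 'm' ∧ c2 = 'a'
      · obtain ⟨rfl, rfl⟩ := hma
        rw [show stripA ('m'::'a'::rest) = stripA rest from by rw [stripA]; simp [List.take],
            show babbleMatch ('m'::'a'::rest) = babbleMatch rest from by
              rw [babbleMatch]; simp [List.take]]
        exact strip_empty_iff rest
      · match rest with
        | [] =>
          rw [stripA, babbleMatch]
          simp [List.take, hye, hma]
        | c3 :: rest' =>
          by_cases haya : c1 = 'a' ∧ c2 = 'y' ∧ c3 = 'a'
          · obtain ⟨rfl, rfl, rfl⟩ := haya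
            rw [show stripA ('a'::'y'::'a'::rest') = stripA rest' from by
                  rw [stripA]; simp [List.take],
                show babbleMatch ('a'::'y'::'a'::rest') = babbleMatch rest' from by
                  rw [babbleMatch]; simp [List.take]]
            exact strip_empty_iff rest'
          · by_cases hwoo : c1 = 'w' ∧ c2 = 'o' ∧ c3 = 'o'
            · obtain ⟨rfl, rfl, rfl⟩ := hwoo
              rw [show stripA ('w'::'o'::'o'::rest') = stripA rest' from by
                    rw [stripA]; simp [List.take],
                  show babbleMatch ('w'::'o'::'o'::rest') = babbleMatch rest' from by
                    rw [babbleMatch]; simp [List.take]]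
              exact strip_empty_iff rest'
            · rw [stripA, babbleMatch]
              simp [List.take, hye, hma, haya, hwoo]
termination_by cs.length

-- the per-word accumulator loop of A counts exactly the words B's predicate accepts
theorem foldl_count (l : List String) (acc : Int) :
    l.foldl (fun answer i => if (stripA i.toList).length = 0 then answer + 1 else answer) acc
      = acc + (l.countP (fun w => babbleMatch w.toList) : Int) := by
  induction l generalizing acc with
  | nil => simp
  | cons x xs ih =>
    rw [List.foldl_cons, List.countP_cons, ih]
    by_cases h : (stripA x.toList).length = 0
    · have hb : babbleMatch x.toList = true := (strip_empty_iff _).1 h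
      simp [h, hb]; ring
    · have hb : babbleMatch x.toList = false := by
        rcases Bool.eq_false_or_eq_true (babbleMatch x.toList) with ht | hf
        · exact absurd ((strip_empty_iff _).2 ht) h
        · exact hf
      simp [h, hb]

-- ===== VERDICT (by name: the statement is the Claim_ definition above) =====
theorem solution_spec : Claim_equal_solution := by
  intro babbling _
  unfold Spec_solution solution solution_alt
  rw [foldl_count babbling 0]
  simp
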